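-- pv_equiv track=rewrite | github.com/miliar/Code_Jam_Webscraper | solutions_python/solutions_year10_round1_nr1/38.py | check_diag2
-- ===== SOURCE A (Python) =====
-- def tr(n, x, y):
--     return (y * n) + x
--
-- def check_diag2(n, k, rot, c):
--     for y in range(n - 1, 0, -1):
--         x = n - 1
--         count = 0
--         while x >= 0 and y < n:
--             if rot[tr(n, x, y)] == c:
--                 count += 1
--                 if count == k:
--                     return True
--             else:
--                 count = 0
--             x -= 1
--             y += 1
--     for x in range(n - 1, -1, -1):
--         y = 0
--         count = 0
--         while x >= 0 and y < n:
--             if rot[tr(n, x, y)] == c: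
--                 count += 1
--                 if count == k:
--                     return True
--             else:
--                 count = 0
--             x -= 1
--             y += 1
--     return False
-- ===== SOURCE B (Python) =====
-- def check_diag2(n, k, rot, c):
--     if k < 1:
--         return False
--     for y in range(n - k + 1):
--         for x in range(k - 1, n):
--             if all(rot[(y + j) * n + (x - j)] == c for j in range(k)):
--                 return True
--     return False
-- ===== Notes on version B (the rewrite author's own statement) =====
-- stated objective: alternative
-- what changed: Replaces A's streaming run-counter walk along each anti-diagonal by a brute-force window test: enumerate every possible start cell (x, y) and check independently whether the k diagonal cells from it all equal c, with an explicit k < 1 guard.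
import Mathlib
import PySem

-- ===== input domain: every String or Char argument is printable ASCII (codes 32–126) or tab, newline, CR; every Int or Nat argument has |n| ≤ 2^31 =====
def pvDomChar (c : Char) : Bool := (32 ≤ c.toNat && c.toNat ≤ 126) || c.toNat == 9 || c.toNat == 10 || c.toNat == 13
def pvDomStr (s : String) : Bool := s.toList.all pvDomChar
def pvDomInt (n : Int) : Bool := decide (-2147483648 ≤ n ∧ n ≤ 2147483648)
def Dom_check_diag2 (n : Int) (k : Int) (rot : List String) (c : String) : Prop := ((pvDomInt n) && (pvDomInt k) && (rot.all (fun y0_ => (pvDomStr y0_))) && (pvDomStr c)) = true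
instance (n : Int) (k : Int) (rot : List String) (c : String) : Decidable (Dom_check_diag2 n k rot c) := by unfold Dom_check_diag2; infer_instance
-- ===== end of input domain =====

-- B replaces A's streaming run-counter walks along each anti-diagonal by a brute-force test of
-- every length-k diagonal window from every start cell; objective: alternative (same task, no counter).


-- ===== PORT A =====
-- rot[i] == c made total: none (IndexError) treated as a mismatch; Pre_ excludes those inputs.
def pvAt (rot : List String) (c : String) (i : Int) : Bool :=
  match PySem.List.pyGet? rot i with
  | some v => v == c
  | none => false

def tr (n : Int) (x : Int) (y : Int) : Int := y * n + x

-- A's inner 'while x >= 0 and y < n' loop, step for step.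
def pvAWhile (n : Int) (k : Int) (rot : List String) (c : String) (x y count : Int) : Bool :=
  if _h : 0 ≤ x ∧ y < n then
    if pvAt rot c (tr n x y) then
      if count + 1 == k then true
      else pvAWhile n k rot c (x - 1) (y + 1) (count + 1)
    else pvAWhile n k rot c (x - 1) (y + 1) 0
  else false
termination_by (n - y).toNat
decreasing_by all_goals omega

def check_diag2 (n : Int) (k : Int) (rot : List String) (c : String) : Bool :=
  ((PySem.List.pyRange (n - 1) 0 (-1)).any (fun y => pvAWhile n k rot c (n - 1) y 0))
  || ((PySem.List.pyRange (n - 1) (-1) (-1)).any (fun x => pvAWhile n k rot c x 0 0))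

-- ===== PORT B =====
-- B's 'all(rot[(y + j) * n + (x - j)] == c for j in range(k))' window test.
def pvWin (rot : List String) (c : String) (n k y x : Int) : Bool :=
  (PySem.List.pyRange 0 k 1).all (fun j => pvAt rot c ((y + j) * n + (x - j)))

def check_diag2_alt (n : Int) (k : Int) (rot : List String) (c : String) : Bool :=
  if k < 1 then false
  else
    (PySem.List.pyRange 0 (n - k + 1) 1).any (fun y =>
      (PySem.List.pyRange (k - 1) n 1).any (fun x => pvWin rot c n k y x))

-- ===== PRECONDITION & SPEC =====
-- Pre_ excludes exactly the inputs on which A raises IndexError: for n ≥ 1, A's very first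
-- access is rot[n*n - 1], so A returns normally iff n ≤ 0 or rot has at least n*n entries.
def Pre_check_diag2 (n : Int) (k : Int) (rot : List String) (c : String) : Prop :=
  n ≤ 0 ∨ n * n ≤ (rot.length : Int)
instance (n : Int) (k : Int) (rot : List String) (c : String) : Decidable (Pre_check_diag2 n k rot c) := by unfold Pre_check_diag2; infer_instance

def pvWitness_check_diag2 : Int × Int × List String × String := (2, 2, ["A", "B", "A", "A"], "A")

def Spec_check_diag2 (n : Int) (k : Int) (rot : List String) (c : String) (out : Bool) : Prop := out = check_diag2_alt n k rot c
instance (n : Int) (k : Int) (rot : List String) (c : String) (out : Bool) : Decidable (Spec_check_diag2 n k rot c out) := by unfold Spec_check_diag2; infer_instance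

-- ===== CLAIM (what is proved, stated in full; the proofs are below) =====
def Claim_equal_check_diag2 : Prop := ∀ (n : Int) (k : Int) (rot : List String) (c : String), Dom_check_diag2 n k rot c → Pre_check_diag2 n k rot c → Spec_check_diag2 n k rot c (check_diag2 n k rot c)

-- ===== LEMMAS AND PROOFS =====

-- A-style scan over an explicit list of x-coordinates of diagonal s (y = s - x).
def pvHitL (k : Int) (rot : List String) (c : String) (n s : Int) : List Int → Int → Bool
  | [], _ => false
  | x :: t, cnt =>
    if pvAt rot c ((s - x) * n + x) then
      if cnt + 1 == k then true else pvHitL k rot c n s t (cnt + 1)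
    else pvHitL k rot c n s t 0

theorem pvAWhile_eq_hitL (n k : Int) (rot : List String) (c : String) :
    ∀ (x y cnt : Int),
      pvAWhile n k rot c x y cnt
        = pvHitL k rot c n (x + y) (PySem.List.pyRange x (max (-1) (x + y - n)) (-1)) cnt := by
  intro x y cnt
  fun_induction pvAWhile n k rot c x y cnt with
  | case1 x y cnt h hc hk =>
    rw [PySem.List.pyRange_neg_one_cons (by omega)]
    simp only [tr] at hc
    simp [pvHitL, show x + y - x = y from by ring, hc, hk]
  | case2 x y cnt h hc hk ih =>
    rw [PySem.List.pyRange_neg_one_cons (by omega)]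
    simp only [tr] at hc
    rw [show (x - 1) + (y + 1) = x + y from by ring] at ih
    simp [pvHitL, show x + y - x = y from by ring, hc, hk, ih]
  | case3 x y cnt h hc ih =>
    rw [PySem.List.pyRange_neg_one_cons (by omega)]
    simp only [tr] at hc
    rw [show (x - 1) + (y + 1) = x + y from by ring] at ih
    simp [pvHitL, show x + y - x = y from by ring, hc, ih]
  | case4 x y cnt h =>
    rw [PySem.List.pyRange_neg_one_eq_nil (by omega)]
    simp [pvHitL]

theorem pvHitL_of_nonpos (k : Int) (rot : List String) (c : String) (n s : Int)
    (hk : k ≤ 0) : ∀ (l : List Int) (cnt : Int), 0 ≤ cnt → pvHitL k rot c n s l cnt = false := by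
  intro l
  induction l with
  | nil => intro cnt _; simp [pvHitL]
  | cons x t ih =>
    intro cnt hcnt
    have hne : (cnt + 1 == k) = false := by simp; omega
    simp only [pvHitL, hne, Bool.false_eq_true, if_false]
    split_ifs with hc
    · exact ih (cnt + 1) (by omega)
    · exact ih 0 (by omega)

-- Characterisation of A's run-counter scan: on the descending x-list of a diagonal it returns true
-- iff the incoming count can be completed at the very top, or some full length-k window is all hits.
theorem pvHitL_iff_win (k : Int) (rot : List String) (c : String) (n s : Int) (hk : 0 < k) :
    ∀ (m : ℕ) (hi lo cnt : Int), (hi - lo + 1).toNat ≤ m → 0 ≤ cnt → cnt < k →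
      (pvHitL k rot c n s (PySem.List.pyRange hi (lo - 1) (-1)) cnt = true ↔
        ((k - cnt ≤ hi - lo + 1 ∧ ∀ j, 0 ≤ j → j < k - cnt → pvAt rot c ((s - (hi - j)) * n + (hi - j)) = true) ∨
         (∃ x0, lo + k - 1 ≤ x0 ∧ x0 ≤ hi ∧ ∀ j, 0 ≤ j → j < k → pvAt rot c ((s - (x0 - j)) * n + (x0 - j)) = true))) := by
  intro m
  induction m with
  | zero =>
    intro hi lo cnt hm h0 h1
    rw [PySem.List.pyRange_neg_one_eq_nil (by omega)]
    simp only [pvHitL]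
    constructor
    · intro h; exact absurd h (by simp)
    · rintro (⟨hb, _⟩ | ⟨x0, hx1, hx2, _⟩) <;> omega
  | succ m ih =>
    intro hi lo cnt hm h0 h1
    by_cases hord : hi < lo
    · rw [PySem.List.pyRange_neg_one_eq_nil (by omega)]
      simp only [pvHitL]
      constructor
      · intro h; exact absurd h (by simp)
      · rintro (⟨hb, _⟩ | ⟨x0, hx1, hx2, _⟩) <;> omega
    · rw [PySem.List.pyRange_neg_one_cons (by omega)]
      simp only [pvHitL]
      by_cases hH : pvAt rot c ((s - hi) * n + hi) = true
      · rw [if_pos hH]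
        by_cases hke : cnt + 1 = k
        · rw [if_pos (by simp [hke])]
          constructor
          · intro _
            left
            refine ⟨by omega, ?_⟩
            intro j hj0 hj1
            have : j = 0 := by omega
            subst this
            simpa using hH
          · intro _; rfl
        · rw [if_neg (by simp [hke])]
          rw [ih (hi - 1) lo (cnt + 1) (by omega) (by omega) (by omega)]
          constructor
          · rintro (⟨hb, hall⟩ | ⟨x0, hx1, hx2, hall⟩)
            · left
              refine ⟨by omega, ?_⟩
              intro j hj0 hj1
              by_cases hj : j = 0
              · subst hj; simpa using hH
              · have := hall (j - 1) (by omega) (by omega)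
                have he : hi - 1 - (j - 1) = hi - j := by ring
                rwa [he] at this
            · right; exact ⟨x0, hx1, by omega, hall⟩
          · rintro (⟨hb, hall⟩ | ⟨x0, hx1, hx2, hall⟩)
            · left
              refine ⟨by omega, ?_⟩
              intro j hj0 hj1
              have := hall (j + 1) (by omega) (by omega)
              have he : hi - (j + 1) = hi - 1 - j := by ring
              rwa [he] at this
            · by_cases hx : x0 = hi
              · left
                refine ⟨by omega, ?_⟩
                intro j hj0 hj1
                have := hall (j + 1) (by omega) (by omega)
                have he : x0 - (j + 1) = hi - 1 - j := by omega
                rwa [he] at this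
              · right; exact ⟨x0, hx1, by omega, hall⟩
      · rw [if_neg hH]
        rw [ih (hi - 1) lo 0 (by omega) (by omega) (by omega)]
        constructor
        · rintro (⟨hb, hall⟩ | ⟨x0, hx1, hx2, hall⟩)
          · right
            refine ⟨hi - 1, by omega, by omega, ?_⟩
            intro j hj0 hj1
            exact hall j hj0 (by omega)
          · right; exact ⟨x0, hx1, by omega, hall⟩
        · rintro (⟨hb, hall⟩ | ⟨x0, hx1, hx2, hall⟩)
          · exact absurd (by simpa using hall 0 (by omega) (by omega)) hH
          · by_cases hx : x0 = hi
            · have h0 := hall 0 (by omega) hk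
              rw [show x0 - 0 = hi from by omega] at h0
              exact absurd h0 hH
            · right; exact ⟨x0, hx1, by omega, hall⟩

-- With count 0 the top-completion case IS the window anchored at the top.
theorem pvHitL_zero_iff_win (k : Int) (rot : List String) (c : String) (n s : Int) (hk : 0 < k)
    (hi lo : Int) :
    pvHitL k rot c n s (PySem.List.pyRange hi (lo - 1) (-1)) 0 = true ↔
      ∃ x0, lo + k - 1 ≤ x0 ∧ x0 ≤ hi ∧ ∀ j, 0 ≤ j → j < k → pvAt rot c ((s - (x0 - j)) * n + (x0 - j)) = true := by
  rw [pvHitL_iff_win k rot c n s hk (hi - lo + 1).toNat hi lo 0 le_rfl le_rfl hk]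
  constructor
  · rintro (⟨hb, hall⟩ | h)
    · exact ⟨hi, by omega, le_rfl, fun j hj0 hj1 => hall j hj0 (by omega)⟩
    · exact h
  · intro h; right; exact h

theorem pvWin_iff (rot : List String) (c : String) (n k y x : Int) :
    pvWin rot c n k y x = true ↔ ∀ j, 0 ≤ j → j < k → pvAt rot c ((y + j) * n + (x - j)) = true := by
  simp only [pvWin, List.all_eq_true, PySem.List.mem_pyRange_one]
  constructor
  · intro h j hj0 hj1; exact h j ⟨hj0, hj1⟩
  · intro h j hj; exact h j hj.1 hj.2

theorem check_diag2_eq (n k : Int) (rot : List String) (c : String) :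
    check_diag2 n k rot c = check_diag2_alt n k rot c := by
  by_cases hk : k < 1
  · unfold check_diag2 check_diag2_alt
    rw [if_pos hk]
    rw [Bool.or_eq_false_iff]
    constructor <;>
    · rw [List.any_eq_false]
      intro a _
      rw [pvAWhile_eq_hitL]
      rw [pvHitL_of_nonpos k rot c n _ (by omega) _ 0 (le_refl 0)]
      simp
  · have hk1 : 0 < k := by omega
    unfold check_diag2 check_diag2_alt
    rw [if_neg hk]
    rw [Bool.eq_iff_iff]
    simp only [Bool.or_eq_true, List.any_eq_true, PySem.List.mem_pyRange_neg_one,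
      PySem.List.mem_pyRange_one]
    constructor
    · rintro (⟨y, ⟨hy0, hyn⟩, hw⟩ | ⟨x, ⟨hx0, hxn⟩, hw⟩)
      · rw [pvAWhile_eq_hitL] at hw
        set s := n - 1 + y with hs
        have hlo : max (-1) (n - 1 + y - n) = max 0 (s - n + 1) - 1 := by omega
        rw [hlo] at hw
        rw [pvHitL_zero_iff_win k rot c n s hk1 (n - 1) (max 0 (s - n + 1))] at hw
        obtain ⟨x0, hx1, hx2, hall⟩ := hw
        refine ⟨s - x0, ⟨by omega, by omega⟩, x0, ⟨by omega, by omega⟩, ?_⟩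
        rw [pvWin_iff]
        intro j hj0 hj1
        have := hall j hj0 hj1
        have he : (s - x0 + j) * n + (x0 - j) = (s - (x0 - j)) * n + (x0 - j) := by ring
        rwa [he]
      · rw [pvAWhile_eq_hitL] at hw
        rw [show x + 0 = x from by ring] at hw
        have hlo : max (-1) (x - n) = max 0 (x - n + 1) - 1 := by omega
        rw [hlo] at hw
        rw [pvHitL_zero_iff_win k rot c n x hk1 x (max 0 (x - n + 1))] at hw
        obtain ⟨x0, hx1, hx2, hall⟩ := hw
        refine ⟨x - x0, ⟨by omega, by omega⟩, x0, ⟨by omega, by omega⟩, ?_⟩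
        rw [pvWin_iff]
        intro j hj0 hj1
        have := hall j hj0 hj1
        have he : (x - x0 + j) * n + (x0 - j) = (x - (x0 - j)) * n + (x0 - j) := by ring
        rwa [he]
    · rintro ⟨y0, ⟨hy0, hyn⟩, x0, ⟨hx0, hxn⟩, hw⟩
      rw [pvWin_iff] at hw
      set s := x0 + y0 with hs
      have hwin : ∃ x1, max 0 (s - n + 1) + k - 1 ≤ x1 ∧ x1 ≤ min s (n - 1) ∧
          ∀ j, 0 ≤ j → j < k → pvAt rot c ((s - (x1 - j)) * n + (x1 - j)) = true := by
        refine ⟨x0, by omega, by omega, ?_⟩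
        intro j hj0 hj1
        have := hw j hj0 hj1
        have he : (y0 + j) * n + (x0 - j) = (s - (x0 - j)) * n + (x0 - j) := by ring
        rwa [he] at this
      by_cases hsmall : s ≤ n - 1
      · right
        refine ⟨s, ⟨by omega, by omega⟩, ?_⟩
        rw [pvAWhile_eq_hitL, show s + 0 = s from by ring]
        have hlo : max (-1) (s - n) = max 0 (s - n + 1) - 1 := by omega
        rw [hlo]
        rw [pvHitL_zero_iff_win k rot c n s hk1 s (max 0 (s - n + 1))]
        obtain ⟨x1, h1, h2, h3⟩ := hwin
        exact ⟨x1, h1, by omega, h3⟩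
      · left
        refine ⟨s - n + 1, ⟨by omega, by omega⟩, ?_⟩
        rw [pvAWhile_eq_hitL, show n - 1 + (s - n + 1) = s from by ring]
        have hlo : max (-1) (s - n) = max 0 (s - n + 1) - 1 := by omega
        rw [hlo]
        rw [pvHitL_zero_iff_win k rot c n s hk1 (n - 1) (max 0 (s - n + 1))]
        obtain ⟨x1, h1, h2, h3⟩ := hwin
        exact ⟨x1, h1, by omega, h3⟩

-- ===== VERDICT (by name: the statement is the Claim_ definition above) =====
theorem check_diag2_spec : Claim_equal_check_diag2 := by
  intro n k rot c _ _
  unfold Spec_check_diag2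
  exact check_diag2_eq n k rot c
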